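-- pv_equiv track=rewrite | github.com/csusb-005411285/CodeBreakersCode | apartment-hunting-ae.py | apartmentHunting
-- ===== SOURCE A (Python) =====
-- def apartmentHunting(blocks, reqs):
--     max_distance_to_all_reqs_from_a_block = [float('-inf') for _ in range(len(blocks))]
--
--     for i in range(len(blocks)):
--         for req in reqs:
--             min_distance_to_a_req_from_a_block = float('inf')
--             for j in range(len(blocks)):
--                 if req in blocks[j] and blocks[j][req]:
--                     min_distance_to_a_req_from_a_block = min(min_distance_to_a_req_from_a_block, abs(j - i))
--
--             max_distance_to_all_reqs_from_a_block[i] = max(max_distance_to_all_reqs_from_a_block[i], min_distance_to_a_req_from_a_block)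
--
--     min_val = min(max_distance_to_all_reqs_from_a_block)
--     return max_distance_to_all_reqs_from_a_block.index(min_val)
-- ===== SOURCE B (Python) =====
-- def apartmentHunting(blocks, reqs):
--     # per-requirement two-pass nearest-distance sweep, then elementwise max and argmin
--     n = len(blocks)
--
--     def forward(has):
--         # dists to nearest True at or before each index (None = none so far)
--         out = []
--         last = None
--         for i, h in enumerate(has):
--             if h:
--                 last = i
--             out.append(None if last is None else i - last)
--         return out
--
--     combined = [-1] * n  # running max of per-req nearest distances; None = unreachable
--     for req in reqs:
--         has = [bool(b.get(req)) for b in blocks]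
--         fwd = forward(has)
--         bwd = forward(has[::-1])[::-1]
--         dist = []
--         for f, b in zip(fwd, bwd):
--             if f is None:
--                 dist.append(b)
--             elif b is None or f < b:
--                 dist.append(f)
--             else:
--                 dist.append(b)
--         new_combined = []
--         for c, d in zip(combined, dist):
--             if c is None or d is None:
--                 new_combined.append(None)
--             else:
--                 new_combined.append(max(c, d))
--         combined = new_combined
--
--     best_i = 0
--     best = combined[0]  # IndexError on empty blocks (A raises ValueError there)
--     for i in range(1, n):
--         v = combined[i]
--         if v is not None and (best is None or v < best):
--             best_i = i
--             best = v
--     return best_i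
-- ===== Notes on version B (the rewrite author's own statement) =====
-- stated objective: faster
-- what changed: Replaced the per-(block,requirement) full scan over all blocks by a per-requirement two-pass (left-to-right and right-to-left) nearest-distance sweep, combined elementwise into a running max and finished with a single argmin pass.
import Mathlib
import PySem

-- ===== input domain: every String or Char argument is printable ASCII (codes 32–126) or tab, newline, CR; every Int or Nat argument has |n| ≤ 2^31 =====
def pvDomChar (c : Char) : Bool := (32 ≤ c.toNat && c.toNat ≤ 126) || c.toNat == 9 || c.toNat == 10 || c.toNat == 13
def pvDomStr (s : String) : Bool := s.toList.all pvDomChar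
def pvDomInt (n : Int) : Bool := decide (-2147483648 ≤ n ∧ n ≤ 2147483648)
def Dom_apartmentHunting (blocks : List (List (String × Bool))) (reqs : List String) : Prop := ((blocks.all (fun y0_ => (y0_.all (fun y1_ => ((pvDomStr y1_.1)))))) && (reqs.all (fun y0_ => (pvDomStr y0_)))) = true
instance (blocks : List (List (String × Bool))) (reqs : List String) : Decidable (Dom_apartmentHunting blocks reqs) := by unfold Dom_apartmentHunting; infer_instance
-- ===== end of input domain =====

-- B replaces A's per-(block,requirement) scan over all blocks by a per-requirement
-- two-pass nearest-distance sweep (objective: faster, O(b*r) instead of O(b^2*r)).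

-- ===== PORT A =====
-- Python float('-inf') / int distances / float('inf') as they occur in A's value list.
inductive PyF
  | negInf
  | fin (v : Int)
  | posInf
deriving DecidableEq, Repr

-- Python '<' on these values
def PyF.ltb : PyF → PyF → Bool
  | _, .negInf => false
  | .negInf, _ => true
  | .fin a, .fin b => a < b
  | .fin _, .posInf => true
  | .posInf, _ => false

-- Python min(a, b) (keeps a on ties) and max(a, b) (keeps a on ties)
def PyF.pymin (a b : PyF) : PyF := if PyF.ltb b a then b else a
def PyF.pymax (a b : PyF) : PyF := if PyF.ltb a b then b else a

def apartmentHunting (blocks : List (List (String × Bool))) (reqs : List String) : Int :=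
  let n : Int := (blocks.length : Int)
  -- the mutated list max_distance_to_all_reqs_from_a_block, entry by entry
  let arr : List PyF := (PySem.List.pyRange 0 n 1).map (fun i =>
    reqs.foldl (fun acc req =>
      PyF.pymax acc ((PySem.List.pyRange 0 n 1).foldl (fun md j =>
        -- 'req in blocks[j] and blocks[j][req]': first-match lookup in the assoc list
        if ((((PySem.List.pyGet? blocks j).getD []).lookup req).getD false) then
          PyF.pymin md (PyF.fin |j - i|)
        else md) PyF.posInf)) PyF.negInf)
  match arr with
  | [] => 0      -- Python: min([]) raises ValueError; excluded by Pre_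
  | a0 :: rest =>
    -- min_val = min(arr) (hand fold: Python min keeps the first extremal value)
    let mv := rest.foldl (fun m x => if PyF.ltb x m then x else m) a0
    (((PySem.List.index? arr mv).getD 0 : Nat) : Int)

-- ===== PORT B =====
-- forward(has): running distance to the nearest True at or before each index
def fwdGo : List Bool → Int → Option Int → List (Option Int)
  | [], _, _ => []
  | h :: t, i, last =>
    let last' := if h then some i else last
    (last'.map (fun l => i - l)) :: fwdGo t (i + 1) last'

-- the 'dist' merge in Source B: None = no occurrence on that side
def mergeMin : Option Int → Option Int → Option Int
  | none, b => b
  | some fv, none => some fv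
  | some fv, some bv => if fv < bv then some fv else some bv

-- the 'new_combined' merge in Source B: None = unreachable requirement
def combineMax : Option Int → Option Int → Option Int
  | none, _ => none
  | some _, none => none
  | some cv, some dv => some (max cv dv)

-- 'v is not None and (best is None or v < best)'
def oltb : Option Int → Option Int → Bool
  | some _, none => true
  | some v, some b => v < b
  | none, _ => false

-- final argmin loop
def amGo : List (Option Int) → Int → Int → Option Int → Int
  | [], _, bi, _ => bi
  | v :: t, i, bi, best =>
    if oltb v best then amGo t (i + 1) i v else amGo t (i + 1) bi best

def apartmentHunting_alt (blocks : List (List (String × Bool))) (reqs : List String) : Int :=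
  let n := blocks.length
  let combined := reqs.foldl (fun combined req =>
      let has := blocks.map (fun b => ((b.lookup req).getD false))
      let fwd := fwdGo has 0 none
      let bwd := (fwdGo has.reverse 0 none).reverse
      let dist := List.zipWith mergeMin fwd bwd
      List.zipWith combineMax combined dist)
    (List.replicate n (some (-1 : Int)))
  match combined with
  | [] => 0      -- combined[0]: IndexError on empty blocks; excluded by Pre_
  | c0 :: rest => amGo rest 1 0 c0

-- ===== PRECONDITION & SPEC =====
-- Pre_ excludes only blocks = [], where A raises ValueError (min of an empty list)
-- and B raises IndexError (combined[0]).
def Pre_apartmentHunting (blocks : List (List (String × Bool))) (reqs : List String) : Prop :=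
  blocks ≠ []
instance (blocks : List (List (String × Bool))) (reqs : List String) : Decidable (Pre_apartmentHunting blocks reqs) := by unfold Pre_apartmentHunting; infer_instance

def pvWitness_apartmentHunting : (List (List (String × Bool))) × List String :=
  ([[("gym", true)], [("school", true)]], ["gym", "school"])

def Spec_apartmentHunting (blocks : List (List (String × Bool))) (reqs : List String) (out : Int) : Prop := out = apartmentHunting_alt blocks reqs
instance (blocks : List (List (String × Bool))) (reqs : List String) (out : Int) : Decidable (Spec_apartmentHunting blocks reqs out) := by unfold Spec_apartmentHunting; infer_instance

-- ===== CLAIM (what is proved, stated in full; the proofs are below) =====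
def Claim_equal_apartmentHunting : Prop := ∀ (blocks : List (List (String × Bool))) (reqs : List String), Dom_apartmentHunting blocks reqs → Pre_apartmentHunting blocks reqs → Spec_apartmentHunting blocks reqs (apartmentHunting blocks reqs)

-- ===== LEMMAS AND PROOFS =====

-- min over an optional running value (value-level semantics shared by both programs)
def optMinI (a : Option Int) (x : Int) : Option Int :=
  some (match a with | none => x | some v => min v x)

def ominOpt : Option Int → Option Int → Option Int
  | none, b => b
  | some v, none => some v
  | some v, some w => some (min v w)

def omFold (xs : List Int) : Option Int := xs.foldl optMinI none

def hasList (blocks : List (List (String × Bool))) (req : String) : List Bool :=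
  blocks.map (fun b => ((b.lookup req).getD false))

-- |j - k| over the positions of True entries: the value both programs minimise
def posDists (has : List Bool) (k : Nat) : List Int :=
  ((List.range has.length).filter (fun j => has.getD j false)).map (fun (j : Nat) => |(j : Int) - (k : Int)|)

def specN (has : List Bool) (k : Nat) : Option Int := omFold (posDists has k)

def toE : Option Int → PyF
  | none => .posInf
  | some d => .fin d

-- the most recent True position after scanning k+1 entries of has (start index i, seed last)
def lastO : List Bool → Int → Option Int → Nat → Option Int
  | [], _, last, _ => last
  | h :: _, i, last, 0 => if h then some i else last
  | h :: t, i, last, k + 1 => lastO t (i + 1) (if h then some i else last) k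

-- ominOpt / optMinI algebra
theorem foldl_optMinI_from (xs : List Int) (a : Option Int) :
    xs.foldl optMinI a = ominOpt a (omFold xs) := by
  induction xs generalizing a with
  | nil => cases a <;> rfl
  | cons x xs ih =>
    simp only [List.foldl_cons, omFold] at *
    rw [ih (optMinI a x), ih (optMinI none x)]
    cases a <;> cases h : xs.foldl optMinI none <;> simp [optMinI, ominOpt]

theorem omFold_cons (x : Int) (xs : List Int) :
    omFold (x :: xs) = ominOpt (some x) (omFold xs) := by
  rw [omFold, List.foldl_cons, foldl_optMinI_from]
  rfl

theorem omFold_append (xs ys : List Int) :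
    omFold (xs ++ ys) = ominOpt (omFold xs) (omFold ys) := by
  rw [omFold, List.foldl_append, foldl_optMinI_from]
  rfl

theorem omFold_spec (xs : List Int) :
    (omFold xs = none ∧ xs = []) ∨
      (∃ v, omFold xs = some v ∧ v ∈ xs ∧ ∀ x ∈ xs, v ≤ x) := by
  induction xs with
  | nil => exact Or.inl ⟨rfl, rfl⟩
  | cons x xs ih =>
    right
    rw [omFold_cons]
    rcases ih with ⟨h1, h2⟩ | ⟨v, hv, hmem, hlb⟩
    · subst h2
      exact ⟨x, by simp [ominOpt, omFold], by simp, by simp⟩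
    · rw [hv]
      refine ⟨min x v, rfl, ?_, ?_⟩
      · rcases le_total x v with h | h
        · simp [min_eq_left h]
        · simp [min_eq_right h]
          exact Or.inr hmem
      · intro y hy
        rcases List.mem_cons.mp hy with rfl | hy
        · exact min_le_left _ _
        · exact le_trans (min_le_right _ _) (hlb y hy)

theorem omFold_eq_of (X Y : List Int)
    (h1 : ∀ x ∈ X, ∃ y ∈ Y, y ≤ x) (h2 : ∀ y ∈ Y, ∃ x ∈ X, x ≤ y) :
    omFold X = omFold Y := by
  rcases omFold_spec X with ⟨hX, rfl⟩ | ⟨v, hv, hvm, hvl⟩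
  · rcases omFold_spec Y with ⟨hY, rfl⟩ | ⟨w, hw, hwm, hwl⟩
    · rfl
    · rcases h2 w hwm with ⟨x, hx, _⟩
      simp at hx
  · rcases omFold_spec Y with ⟨hY, rfl⟩ | ⟨w, hw, hwm, hwl⟩
    · rcases h1 v hvm with ⟨y, hy, _⟩
      simp at hy
    · rw [hv, hw]
      rcases h1 v hvm with ⟨y, hy, hyv⟩
      rcases h2 w hwm with ⟨x, hx, hxw⟩
      have hvw : v = w := le_antisymm (le_trans (hvl x hx) hxw) (le_trans (hwl y hy) hyv)
      rw [hvw]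

-- ===== A side: the inner loop computes specN =====
theorem pymin_toE (o : Option Int) (x : Int) :
    PyF.pymin (toE o) (PyF.fin x) = toE (optMinI o x) := by
  cases o with
  | none => rfl
  | some v =>
    simp only [toE, optMinI, PyF.pymin, PyF.ltb, decide_eq_true_eq]
    split_ifs with h <;> (congr 1 <;> omega)

theorem foldE_filter (l : List Nat) (p : Nat → Bool) (g : Nat → Int) (o : Option Int) :
    l.foldl (fun md j => if p j then PyF.pymin md (PyF.fin (g j)) else md) (toE o)
      = toE (((l.filter p).map g).foldl optMinI o) := by
  induction l generalizing o with
  | nil => rfl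
  | cons j l ih =>
    by_cases hp : p j
    · simp only [List.foldl_cons, List.filter_cons, hp, if_pos, List.map_cons]
      rw [pymin_toE, ih (optMinI o (g j))]
    · simp only [List.foldl_cons, List.filter_cons, hp, List.map_cons]
      simp [hp, ih o]

theorem A_inner (blocks : List (List (String × Bool))) (req : String) (k : Nat) :
    (PySem.List.pyRange 0 (blocks.length : Int) 1).foldl (fun md j =>
        if ((((PySem.List.pyGet? blocks j).getD []).lookup req).getD false) then
          PyF.pymin md (PyF.fin |j - (k : Int)|)
        else md) PyF.posInf
      = toE (specN (hasList blocks req) k) := by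
  rw [PySem.List.pyRange_zero_nat, List.foldl_map]
  have hlen : (hasList blocks req).length = blocks.length := by simp [hasList]
  have hcongr : ∀ (md : PyF) (j : Nat), j ∈ List.range blocks.length →
      (if ((((PySem.List.pyGet? blocks (j : Int)).getD []).lookup req).getD false) then
        PyF.pymin md (PyF.fin |(j : Int) - (k : Int)|) else md)
      = (if (hasList blocks req).getD j false then
          PyF.pymin md (PyF.fin |(j : Int) - (k : Int)|) else md) := by
    intro md j hj
    rw [List.mem_range] at hj
    have : (hasList blocks req).getD j false = ((blocks[j].lookup req).getD false) := by
      simp [hasList, List.getD, List.getElem?_eq_getElem, hj]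
    rw [this]
    simp [PySem.List.pyGet?_natCast, List.getElem?_eq_getElem, hj]
  rw [PySem.List.foldl_congr_mem _ _ _ _ hcongr]
  have hstart : PyF.posInf = toE none := rfl
  rw [hstart, foldE_filter]
  simp only [specN, posDists, omFold, hlen]

-- ===== B side: the forward sweep =====
theorem fwdGo_length (has : List Bool) (i : Int) (last : Option Int) :
    (fwdGo has i last).length = has.length := by
  induction has generalizing i last with
  | nil => rfl
  | cons h t ih => simp [fwdGo, ih]

theorem fwdGo_getElem? (has : List Bool) (i : Int) (last : Option Int) (k : Nat)
    (hk : k < has.length) :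
    (fwdGo has i last)[k]? = some ((lastO has i last k).map (fun l => i + (k : Int) - l)) := by
  induction has generalizing i last k with
  | nil => simp at hk
  | cons h t ih =>
    cases k with
    | zero => simp [fwdGo, lastO]
    | succ k =>
      have hk' : k < t.length := by simpa using hk
      simp only [fwdGo, List.getElem?_cons_succ, lastO]
      rw [ih (i + 1) (if h then some i else last) k hk']
      have hf : (fun l => i + 1 + (k : Int) - l) = (fun l => i + ((k : Nat) + 1 : Nat) - l) := by
        funext l
        push_cast
        ring
      rw [hf]


theorem ominOpt_absorb (v w : Int) (Y : Option Int) (h : w ≤ v) :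
    ominOpt (some v) (ominOpt (some w) Y) = ominOpt (some w) Y := by
  cases Y <;> simp [ominOpt] <;> omega

theorem lastO_spec (has : List Bool) (k : Nat) (i0 : Int) (last : Option Int)
    (hk : k < has.length) (hlast : ∀ l, last = some l → l < i0) :
    (lastO has i0 last k).map (fun l => i0 + (k : Int) - l)
      = ominOpt (last.map (fun l => i0 + (k : Int) - l))
          (omFold (((List.range (k + 1)).filter (fun j => has.getD j false)).map
            (fun (j : Nat) => (k : Int) - (j : Int)))) := by
  induction has generalizing k i0 last with
  | nil => simp at hk
  | cons h t ih =>
    cases k with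
    | zero =>
      by_cases hh : h = true
      · cases last with
        | none => simp [lastO, hh, omFold, optMinI, ominOpt]
        | some l =>
          have hl := hlast l rfl
          simp [lastO, hh, omFold, optMinI, ominOpt]
          omega
      · cases last <;> simp [lastO, hh, omFold, ominOpt]
    | succ k =>
      have hk' : k < t.length := by simpa using hk
      have hlast' : ∀ l, (if h then some i0 else last) = some l → l < i0 + 1 := by
        intro l hl
        by_cases hh : h = true
        · simp [hh] at hl; omega
        · simp [hh] at hl; have := hlast l hl; omega
      have IH := ih k (i0 + 1) (if h then some i0 else last) hk' hlast'
      have hfun : (fun l => i0 + ((k : Nat) + 1 : Nat) - l) = (fun l => (i0 + 1) + (k : Int) - l) := by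
        funext l; push_cast; ring
      have hbig : (((List.range (k + 1 + 1)).filter (fun j => (h :: t).getD j false)).map
            (fun (j : Nat) => ((k + 1 : Nat) : Int) - (j : Int)))
          = (if h then [((k : Int) + 1)] else []) ++
            (((List.range (k + 1)).filter (fun j => t.getD j false)).map
              (fun (j : Nat) => (k : Int) - (j : Int))) := by
        rw [List.range_succ_eq_map]
        rw [List.filter_cons]
        by_cases hh : h = true <;>
          simp [hh, List.filter_map, List.map_map, Function.comp_def] <;>
          first
            | (apply List.map_congr_left; intro j hj; push_cast; ring)
            | skip
      simp only [lastO, hfun, IH, hbig]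
      by_cases hh : h = true
      · simp only [hh, if_true]
        rw [List.singleton_append, omFold_cons]
        have hv : i0 + 1 + (k : Int) - i0 = (k : Int) + 1 := by ring
        cases last with
        | none =>
          simp only [Option.map_some, Option.map_none, hv]
          rfl
        | some l =>
          have hl := hlast l rfl
          simp only [Option.map_some, hv]
          rw [ominOpt_absorb _ _ _ (by omega)]
      · simp [hh]

theorem fwd_spec (has : List Bool) (k : Nat) (hk : k < has.length) :
    (fwdGo has 0 none)[k]? = some (omFold (((List.range (k + 1)).filter (fun j => has.getD j false)).map
      (fun (j : Nat) => (k : Int) - (j : Int)))) := by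
  rw [fwdGo_getElem? has 0 none k hk]
  rw [lastO_spec has k 0 none hk (by intro l hl; simp at hl)]
  simp [ominOpt]

theorem getD_reverse (has : List Bool) (j : Nat) (hj : j < has.length) :
    has.reverse.getD j false = has.getD (has.length - 1 - j) false := by
  simp [List.getD, List.getElem?_reverse hj]

theorem mergeMin_eq_ominOpt (a b : Option Int) : mergeMin a b = ominOpt a b := by
  cases a <;> cases b <;> simp only [mergeMin, ominOpt]
  split_ifs with h <;> (congr 1 <;> omega)

-- the merged two-pass distance at index k is exactly specN
theorem dist_spec (has : List Bool) (k : Nat) (hk : k < has.length) :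
    (List.zipWith mergeMin (fwdGo has 0 none) ((fwdGo has.reverse 0 none).reverse))[k]?
      = some (specN has k) := by
  have hn : 0 < has.length := Nat.lt_of_le_of_lt (Nat.zero_le k) hk
  have h1 := fwd_spec has k hk
  have hk2 : has.length - 1 - k < has.reverse.length := by simp; omega
  have h2 : ((fwdGo has.reverse 0 none).reverse)[k]? = (fwdGo has.reverse 0 none)[has.length - 1 - k]? := by
    rw [List.getElem?_reverse (by rw [fwdGo_length]; simpa using hk)]
    rw [fwdGo_length]
    simp
  have h3 := fwd_spec has.reverse (has.length - 1 - k) hk2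
  have hidx : has.reverse.length - 1 - (has.length - 1 - k) = k := by simp; omega
  rw [List.getElem?_zipWith, h1, h2, h3]
  simp only []
  rw [mergeMin_eq_ominOpt, ← omFold_append]
  congr 1
  have hnk : has.reverse.length = has.length := by simp
  apply omFold_eq_of
  · intro x hx
    rcases List.mem_append.mp hx with hx | hx
    · rcases List.mem_map.mp hx with ⟨j, hjf, rfl⟩
      rcases List.mem_filter.mp hjf with ⟨hjr, hjh⟩
      have hjk : j ≤ k := by simpa [Nat.lt_succ_iff] using List.mem_range.mp hjr
      refine ⟨|(j : Int) - (k : Int)|, ?_, ?_⟩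
      · exact List.mem_map.mpr ⟨j, List.mem_filter.mpr ⟨List.mem_range.mpr (by omega), hjh⟩, rfl⟩
      · rw [abs_sub_comm, abs_of_nonneg (show (0:Int) ≤ (k : Int) - (j : Int) by omega)]
    · rcases List.mem_map.mp hx with ⟨j, hjf, rfl⟩
      rcases List.mem_filter.mp hjf with ⟨hjr, hjh⟩
      have hjb : j ≤ has.length - 1 - k := by
        have := List.mem_range.mp hjr
        omega
      have hjn : j < has.length := by omega
      rw [getD_reverse has j hjn] at hjh
      refine ⟨|((has.length - 1 - j : Nat) : Int) - (k : Int)|, ?_, ?_⟩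
      · exact List.mem_map.mpr ⟨has.length - 1 - j,
          List.mem_filter.mpr ⟨List.mem_range.mpr (by omega), hjh⟩, rfl⟩
      · rw [abs_of_nonneg (show (0:Int) ≤ ((has.length - 1 - j : Nat) : Int) - (k : Int) by omega)]
        omega
  · intro y hy
    rcases List.mem_map.mp hy with ⟨j, hjf, rfl⟩
    rcases List.mem_filter.mp hjf with ⟨hjr, hjh⟩
    have hjn : j < has.length := List.mem_range.mp hjr
    by_cases hjk : j ≤ k
    · refine ⟨(k : Int) - (j : Int), List.mem_append.mpr (Or.inl ?_), ?_⟩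
      · exact List.mem_map.mpr ⟨j, List.mem_filter.mpr ⟨List.mem_range.mpr (by omega), hjh⟩, rfl⟩
      · rw [abs_sub_comm, abs_of_nonneg (show (0:Int) ≤ (k : Int) - (j : Int) by omega)]
    · refine ⟨((has.length - 1 - k : Nat) : Int) - ((has.length - 1 - j : Nat) : Int),
        List.mem_append.mpr (Or.inr ?_), ?_⟩
      · refine List.mem_map.mpr ⟨has.length - 1 - j, List.mem_filter.mpr ⟨List.mem_range.mpr (by omega), ?_⟩, rfl⟩
        rw [getD_reverse has _ (by omega)]
        have hjj : has.length - 1 - (has.length - 1 - j) = j := by omega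
        rw [hjj]
        exact hjh
      · rw [abs_of_nonneg (show (0:Int) ≤ (j : Int) - (k : Int) by omega)]
        omega


-- ===== combined fold over reqs =====
theorem zip_dist_map (blocks : List (List (String × Bool))) (r : String) (g : Nat → Option Int) :
    List.zipWith combineMax ((List.range blocks.length).map g)
        (List.zipWith mergeMin (fwdGo (hasList blocks r) 0 none)
          ((fwdGo (hasList blocks r).reverse 0 none).reverse))
      = (List.range blocks.length).map (fun k => combineMax (g k) (specN (hasList blocks r) k)) := by
  have hlen : (hasList blocks r).length = blocks.length := by simp [hasList]
  apply List.ext_getElem?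
  intro i
  by_cases hi : i < blocks.length
  · rw [List.getElem?_zipWith]
    have h1 : ((List.range blocks.length).map g)[i]? = some (g i) := by
      simp [List.getElem?_range, hi]
    have h2 := dist_spec (hasList blocks r) i (by omega)
    rw [h1, h2]
    simp [List.getElem?_range, hi]
  · have h1 : ((List.range blocks.length).map g)[i]? = none := by
      rw [List.getElem?_eq_none] <;> simp <;> omega
    have h2 : ((List.range blocks.length).map (fun k => combineMax (g k) (specN (hasList blocks r) k)))[i]? = none := by
      rw [List.getElem?_eq_none] <;> simp <;> omega
    rw [List.getElem?_zipWith, h1, h2]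

theorem combined_spec (blocks : List (List (String × Bool))) (reqs : List String) :
    reqs.foldl (fun combined req =>
        List.zipWith combineMax combined
          (List.zipWith mergeMin (fwdGo (hasList blocks req) 0 none)
            ((fwdGo (hasList blocks req).reverse 0 none).reverse)))
      (List.replicate blocks.length (some (-1 : Int)))
      = (List.range blocks.length).map (fun k =>
          reqs.foldl (fun c req => combineMax c (specN (hasList blocks req) k)) (some (-1 : Int))) := by
  have aux : ∀ (rl : List String) (g : Nat → Option Int),
      rl.foldl (fun combined req =>
        List.zipWith combineMax combined
          (List.zipWith mergeMin (fwdGo (hasList blocks req) 0 none)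
            ((fwdGo (hasList blocks req).reverse 0 none).reverse)))
        ((List.range blocks.length).map g)
      = (List.range blocks.length).map (fun k =>
          rl.foldl (fun c req => combineMax c (specN (hasList blocks req) k)) (g k)) := by
    intro rl
    induction rl with
    | nil => intro g; rfl
    | cons r rs ih =>
      intro g
      simp only [List.foldl_cons]
      rw [zip_dist_map blocks r g, ih]
  have hrepl : List.replicate blocks.length (some (-1 : Int))
      = (List.range blocks.length).map (fun _ => some (-1 : Int)) := by
    rw [List.map_const']
    simp
  rw [hrepl, aux]

-- ===== per-index value equality (reqs nonempty) =====
theorem specN_nonneg (has : List Bool) (k : Nat) (d : Int) (h : specN has k = some d) : 0 ≤ d := by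
  rcases omFold_spec (posDists has k) with ⟨h1, _⟩ | ⟨v, hv, hvm, _⟩
  · rw [specN] at h; rw [h1] at h; cases h
  · rw [specN] at h; rw [hv] at h
    injection h with h
    subst h
    rcases List.mem_map.mp hvm with ⟨j, _, rfl⟩
    exact abs_nonneg _

theorem pymax_toE (o sv : Option Int) :
    PyF.pymax (toE o) (toE sv) = toE (combineMax o sv) := by
  cases o <;> cases sv <;> simp only [toE, combineMax, PyF.pymax, PyF.ltb, decide_eq_true_eq]
  · rfl
  · rfl
  · rfl
  · split_ifs with h <;> (congr 1 <;> omega)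

theorem fold_step_toE (blocks : List (List (String × Bool))) (k : Nat) (rs : List String) :
    ∀ (o : Option Int),
      rs.foldl (fun acc req => PyF.pymax acc (toE (specN (hasList blocks req) k))) (toE o)
        = toE (rs.foldl (fun c req => combineMax c (specN (hasList blocks req) k)) o) := by
  induction rs with
  | nil => intro o; rfl
  | cons r rs ih =>
    intro o
    simp only [List.foldl_cons]
    rw [pymax_toE, ih]

theorem val_eq (blocks : List (List (String × Bool))) (r : String) (rs : List String) (k : Nat) :
    (r :: rs).foldl (fun acc req => PyF.pymax acc (toE (specN (hasList blocks req) k))) PyF.negInf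
      = toE ((r :: rs).foldl (fun c req => combineMax c (specN (hasList blocks req) k)) (some (-1 : Int))) := by
  simp only [List.foldl_cons]
  have hA : PyF.pymax PyF.negInf (toE (specN (hasList blocks r) k)) = toE (specN (hasList blocks r) k) := by
    cases specN (hasList blocks r) k <;> rfl
  have hB : combineMax (some (-1 : Int)) (specN (hasList blocks r) k) = specN (hasList blocks r) k := by
    cases hs : specN (hasList blocks r) k with
    | none => rfl
    | some d =>
      have hd := specN_nonneg _ _ _ hs
      simp only [combineMax]
      congr 1
      omega
  rw [hA, hB, fold_step_toE]

-- ===== argmin =====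
theorem ltb_toE (a b : Option Int) : PyF.ltb (toE a) (toE b) = oltb a b := by
  cases a <;> cases b <;> rfl

theorem toE_inj (a b : Option Int) (h : toE a = toE b) : a = b := by
  cases a <;> cases b <;> simp_all [toE]

theorem index?_map_toE (c : List (Option Int)) (v : Option Int) :
    PySem.List.index? (c.map toE) (toE v) = PySem.List.index? c v := by
  induction c with
  | nil => rfl
  | cons x c ih =>
    by_cases hx : x = v
    · subst hx
      rw [List.map_cons, PySem.List.index?_cons_self, PySem.List.index?_cons_self]
    · rw [List.map_cons, PySem.List.index?_cons_of_ne _ (fun h => hx (toE_inj _ _ h)),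
        PySem.List.index?_cons_of_ne _ hx, ih]

theorem map_fold_min (c : List (Option Int)) (c0 : Option Int) :
    (c.map toE).foldl (fun m x => if PyF.ltb x m then x else m) (toE c0)
      = toE (c.foldl (fun m v => if oltb v m then v else m) c0) := by
  induction c generalizing c0 with
  | nil => rfl
  | cons v c ih =>
    simp only [List.map_cons, List.foldl_cons, ltb_toE]
    cases h : oltb v c0 <;> simp only [h, Bool.false_eq_true, if_false, if_true]
    · exact ih c0
    · exact ih v

theorem oltb_irrefl (v : Option Int) : oltb v v = false := by
  cases v <;> simp [oltb]

theorem oltb_step (x v best : Option Int) (h1 : oltb v best = true) (h2 : oltb x best = false) :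
    oltb x v = false := by
  cases x <;> cases v <;> cases best <;> simp_all [oltb] <;> omega

theorem index?_append_of_some {α : Type} [BEq α] [LawfulBEq α] (pre l : List α) (v : α)
    (bi : Nat) (h : PySem.List.index? pre v = some bi) :
    PySem.List.index? (pre ++ l) v = some bi := by
  induction pre generalizing bi with
  | nil => simp [PySem.List.index?_eq_idxOf?] at h
  | cons x p ih =>
    by_cases hx : x = v
    · subst hx
      rw [PySem.List.index?_cons_self] at h
      rw [List.cons_append, PySem.List.index?_cons_self]
      exact h
    · rw [PySem.List.index?_cons_of_ne _ hx] at h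
      rcases Option.map_eq_some_iff.mp h with ⟨b', hb', rfl⟩
      rw [List.cons_append, PySem.List.index?_cons_of_ne _ hx, ih b' hb']
      rfl

theorem amGo_spec (c : List (Option Int)) : ∀ (pre : List (Option Int)) (bi : Nat) (best : Option Int),
    (∀ x ∈ pre, oltb x best = false) → PySem.List.index? pre best = some bi →
    amGo c (pre.length : Int) (bi : Int) best
      = (((PySem.List.index? (pre ++ c) (c.foldl (fun m v => if oltb v m then v else m) best)).getD 0 : Nat) : Int) := by
  induction c with
  | nil =>
    intro pre bi best hprev hidx
    simp only [amGo, List.append_nil, List.foldl_nil, hidx, Option.getD_some]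
  | cons v t ih =>
    intro pre bi best hprev hidx
    simp only [amGo, List.foldl_cons]
    by_cases hv : oltb v best = true
    · rw [if_pos hv, if_pos hv]
      have hnot : v ∉ pre := by intro hm; simp [hprev v hm] at hv
      have h1 : ∀ x ∈ pre ++ [v], oltb x v = false := by
        intro x hx
        rcases List.mem_append.mp hx with hx | hx
        · exact oltb_step x v best hv (hprev x hx)
        · rcases List.mem_singleton.mp hx with rfl
          exact oltb_irrefl _
      have h2 : PySem.List.index? (pre ++ [v]) v = some pre.length := by
        exact PySem.List.index?_append_singleton_self pre v hnot
      have := ih (pre ++ [v]) pre.length v h1 h2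
      push_cast [List.length_append, List.length_cons, List.length_nil] at this
      simpa [List.append_assoc] using this
    · rw [if_neg hv, if_neg hv]
      have h1 : ∀ x ∈ pre ++ [v], oltb x best = false := by
        intro x hx
        rcases List.mem_append.mp hx with hx | hx
        · exact hprev x hx
        · rcases List.mem_singleton.mp hx with rfl
          exact eq_false_of_ne_true hv
      have h2 := index?_append_of_some pre [v] best bi hidx
      have := ih (pre ++ [v]) bi best h1 h2
      rw [List.length_append] at this
      simpa using this

-- reqs = [] degenerate case helpers
theorem fold_min_const (x : PyF) (hx : PyF.ltb x x = false) :
    ∀ m : Nat, (List.replicate m x).foldl (fun m x => if PyF.ltb x m then x else m) x = x := by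
  intro m
  induction m with
  | zero => rfl
  | succ m ih => simp only [List.replicate_succ, List.foldl_cons, hx, Bool.false_eq_true, if_false, ih]

theorem amGo_replicate (x : Option Int) (hx : oltb x x = false) :
    ∀ (m : Nat) (i bi : Int), amGo (List.replicate m x) i bi x = bi := by
  intro m
  induction m with
  | zero => intro i bi; rfl
  | succ m ih => intro i bi; simp only [List.replicate_succ, amGo, hx, Bool.false_eq_true, if_false, ih]

-- ===== VERDICT (by name: the statement is the Claim_ definition above) =====
theorem apartmentHunting_spec : Claim_equal_apartmentHunting := by
  unfold Claim_equal_apartmentHunting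
  intro blocks reqs _hdom hpre
  unfold Spec_apartmentHunting
  have hne : blocks ≠ [] := hpre
  have hN : 0 < blocks.length := List.length_pos_iff.mpr hne
  simp only [apartmentHunting, apartmentHunting_alt]
  have harr : (PySem.List.pyRange 0 (blocks.length : Int) 1).map (fun i =>
      reqs.foldl (fun acc req =>
        PyF.pymax acc ((PySem.List.pyRange 0 (blocks.length : Int) 1).foldl (fun md j =>
          if ((((PySem.List.pyGet? blocks j).getD []).lookup req).getD false) then
            PyF.pymin md (PyF.fin |j - i|)
          else md) PyF.posInf)) PyF.negInf)
      = (List.range blocks.length).map (fun k =>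
          reqs.foldl (fun acc req => PyF.pymax acc (toE (specN (hasList blocks req) k))) PyF.negInf) := by
    rw [PySem.List.pyRange_zero_nat, List.map_map]
    apply List.map_congr_left
    intro k _
    simp only [Function.comp]
    have hbody : ∀ (acc : PyF) (req : String), req ∈ reqs →
        PyF.pymax acc (((List.range blocks.length).map (fun (k : Nat) => (k : Int))).foldl (fun md j =>
          if ((((PySem.List.pyGet? blocks j).getD []).lookup req).getD false) then
            PyF.pymin md (PyF.fin |j - (k : Int)|)
          else md) PyF.posInf)
        = PyF.pymax acc (toE (specN (hasList blocks req) k)) := by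
      intro acc req _
      rw [← PySem.List.pyRange_zero_nat, A_inner blocks req k]
    exact PySem.List.foldl_congr_mem _ _ _ _ hbody
  rw [harr]
  cases reqs with
  | nil =>
    obtain ⟨m, hm⟩ : ∃ m, blocks.length = m + 1 := ⟨blocks.length - 1, by omega⟩
    simp only [List.foldl_nil, hm]
    rw [List.map_const']
    simp only [List.length_range, List.replicate_succ]
    rw [fold_min_const PyF.negInf rfl m, PySem.List.index?_cons_self,
      amGo_replicate (some (-1 : Int)) (by simp [oltb]) m 1 0]
    rfl
  | cons r rs =>
    have hcomb := combined_spec blocks (r :: rs)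
    simp only [hasList] at hcomb
    rw [hcomb]
    have hval : (List.range blocks.length).map (fun k =>
        (r :: rs).foldl (fun acc req => PyF.pymax acc (toE (specN (hasList blocks req) k))) PyF.negInf)
        = ((List.range blocks.length).map (fun k =>
            (r :: rs).foldl (fun c req => combineMax c (specN (hasList blocks req) k)) (some (-1 : Int)))).map toE := by
      rw [List.map_map]
      apply List.map_congr_left
      intro k _
      exact val_eq blocks r rs k
    rw [hval]
    simp only [hasList]
    cases hm : (List.range blocks.length).map (fun k =>
        (r :: rs).foldl (fun c req =>
          combineMax c (specN (blocks.map (fun b => ((b.lookup req).getD false))) k)) (some (-1 : Int))) with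
    | nil =>
      have hlen := congrArg List.length hm
      rw [List.length_map, List.length_range, List.length_nil] at hlen
      omega
    | cons c0 crest =>
      simp only [List.map_cons]
      rw [map_fold_min crest c0, ← List.map_cons, index?_map_toE (c0 :: crest)]
      have ham := amGo_spec crest [c0] 0 c0
        (by intro x hx; rcases List.mem_singleton.mp hx with rfl; exact oltb_irrefl _)
        (PySem.List.index?_cons_self c0 [])
      simp only [List.length_cons, List.length_nil, List.singleton_append] at ham
      norm_num at ham
      exact ham.symm
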